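-- pv_equiv track=rewrite | github.com/lessandro/ircd | ircd/kernel/irc_access.py | parse_mask
-- ===== SOURCE A (Python) =====
-- def parse_mask(mask):
--     part_syms = {'!': 1, '@': 2, '$': 3}
--     parts = ['', '', '', '']
--     cur = 0
--
--     for c in mask:
--         if c in part_syms:
--             cur = part_syms[c]
--             parts[cur] = ''
--         else:
--             parts[cur] += c
--
--     parts = [part or '*' for part in parts]
--     return '{0}!{1}@{2}'.format(*parts)
-- ===== SOURCE B (Python) =====
-- def parse_mask(mask):
--     # tokenize into segments separated by delimiters, remembering the delimiters
--     segs = ['']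
--     delims = []
--     for c in mask:
--         if c in '!@$':
--             delims.append(c)
--             segs.append('')
--         else:
--             segs[-1] += c
--     # last-wins overwrite of the part named by each delimiter
--     table = {'!': 1, '@': 2, '$': 3}
--     parts = [segs[0], '', '', '']
--     for d, text in zip(delims, segs[1:]):
--         parts[table[d]] = text
--     return '{}!{}@{}'.format(parts[0] or '*', parts[1] or '*', parts[2] or '*')
-- ===== Notes on version B (the rewrite author's own statement) =====
-- stated objective: alternative
-- what changed: Replaces A's single-pass state machine (a 'cur' pointer selecting which part each character is appended to, reset on every delimiter) by a two-phase pipeline: first tokenize the mask into segments and the delimiters between them, then a last-wins overwrite pass that assigns each delimiter's following segment to its part.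
import Mathlib
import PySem

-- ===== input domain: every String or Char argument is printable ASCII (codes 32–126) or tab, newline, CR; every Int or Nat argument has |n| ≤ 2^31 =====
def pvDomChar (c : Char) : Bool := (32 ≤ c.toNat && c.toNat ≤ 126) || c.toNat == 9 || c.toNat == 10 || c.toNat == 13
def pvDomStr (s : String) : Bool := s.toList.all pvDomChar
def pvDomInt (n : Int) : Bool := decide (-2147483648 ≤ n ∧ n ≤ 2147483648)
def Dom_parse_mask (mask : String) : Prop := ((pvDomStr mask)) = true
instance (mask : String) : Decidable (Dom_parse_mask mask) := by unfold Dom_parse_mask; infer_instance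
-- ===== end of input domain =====

-- B replaces A's single-pass 'cur'-pointer state machine by a tokenize-then-overwrite pipeline
-- (segments + delimiters first, then a last-wins assignment pass); alternative structure, same cost.

-- ===== PORT A =====
def pmSyms : PySem.Dict Char Nat := PySem.Dict.mk [('!', 1), ('@', 2), ('$', 3)]

-- one iteration of A's character loop; state = (parts, cur)
def pmStepA (st : List (List Char) × Nat) (c : Char) : List (List Char) × Nat :=
  match pmSyms.get? c with
  | some i => (st.1.set i [], i)                                 -- cur = part_syms[c]; parts[cur] = ''
  | none   => (st.1.set st.2 (st.1.getD st.2 [] ++ [c]), st.2)   -- parts[cur] += c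

def pmOr (p : List Char) : List Char := if p = [] then ['*'] else p   -- part or '*'

def parse_mask (mask : String) : String :=
  let st := mask.toList.foldl pmStepA ([[], [], [], []], 0)
  let parts := st.1.map pmOr
  String.mk (parts.getD 0 [] ++ '!' :: parts.getD 1 [] ++ '@' :: parts.getD 2 [])

-- ===== PORT B =====
def pmIsDelim (c : Char) : Bool := c = '!' || c = '@' || c = '$'   -- c in '!@$'

-- segs[-1] += c
def pmAddLast : List (List Char) → Char → List (List Char)
  | [], _ => []
  | [s], c => [s ++ [c]]
  | s :: ss, c => s :: pmAddLast ss c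

-- one iteration of B's tokenizing loop; state = (segs, delims)
def pmStepB (st : List (List Char) × List Char) (c : Char) : List (List Char) × List Char :=
  if pmIsDelim c then (st.1 ++ [[]], st.2 ++ [c]) else (pmAddLast st.1 c, st.2)

def pmTable : PySem.Dict Char Nat := PySem.Dict.mk [('!', 1), ('@', 2), ('$', 3)]

def parse_mask_alt (mask : String) : String :=
  let st := mask.toList.foldl pmStepB ([[]], [])
  let segs := st.1
  let delims := st.2
  let parts := (delims.zip (segs.drop 1)).foldl
      (fun (p : List (List Char)) dt => p.set (pmTable.getD dt.1 0) dt.2)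
      [segs.getD 0 [], [], [], []]
  String.mk (pmOr (parts.getD 0 []) ++ '!' :: pmOr (parts.getD 1 []) ++ '@' :: pmOr (parts.getD 2 []))

-- ===== PRECONDITION & SPEC =====
def Spec_parse_mask (mask : String) (out : String) : Prop := out = parse_mask_alt mask
instance (mask : String) (out : String) : Decidable (Spec_parse_mask mask out) := by unfold Spec_parse_mask; infer_instance

-- ===== CLAIM (what is proved, stated in full; the proofs are below) =====
def Claim_equal_parse_mask : Prop := ∀ (mask : String), Dom_parse_mask mask → Spec_parse_mask mask (parse_mask mask)

-- ===== LEMMAS AND PROOFS =====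

-- reference tokenization: (first segment, list of (delimiter, following segment) pairs)
def pmTokens : List Char → List Char × List (Char × List Char)
  | [] => ([], [])
  | c :: cs =>
    let t := pmTokens cs
    if pmIsDelim c then ([], (c, t.1) :: t.2) else (c :: t.1, t.2)

-- the last-wins overwrite pass (exactly B's second loop body)
def pmOvw (parts : List (List Char)) (rest : List (Char × List Char)) : List (List Char) :=
  rest.foldl (fun (p : List (List Char)) dt => p.set (pmTable.getD dt.1 0) dt.2) parts

lemma pmSet4 (a b c d x : List Char) (n : Nat) :
    ∃ q0 q1 q2 q3, ([a, b, c, d] : List (List Char)).set n x = [q0, q1, q2, q3] := by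
  rcases n with _ | _ | _ | _ | n
  · exact ⟨x, b, c, d, rfl⟩
  · exact ⟨a, x, c, d, rfl⟩
  · exact ⟨a, b, x, d, rfl⟩
  · exact ⟨a, b, c, x, rfl⟩
  · exact ⟨a, b, c, d, by simp [List.set]⟩

lemma pmOvw4 (rest : List (Char × List Char)) :
    ∀ a b c d, ∃ q0 q1 q2 q3, pmOvw [a, b, c, d] rest = [q0, q1, q2, q3] := by
  induction rest with
  | nil => intro a b c d; exact ⟨a, b, c, d, rfl⟩
  | cons dt rest ih =>
    intro a b c d
    obtain ⟨q0, q1, q2, q3, hset⟩ := pmSet4 a b c d dt.2 (pmTable.getD dt.1 0)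
    simpa [pmOvw, hset] using ih q0 q1 q2 q3

-- A's loop, from any 4-part state: append the first token to the current part, then
-- perform the last-wins overwrite pass over the (delimiter, segment) pairs.
lemma pmA_run (cs : List Char) :
    ∀ p0 p1 p2 p3 (cur : Nat), cur < 4 →
      ∃ k, cs.foldl pmStepA ([p0, p1, p2, p3], cur) =
        (pmOvw (([p0, p1, p2, p3] : List (List Char)).set cur
                  (([p0, p1, p2, p3] : List (List Char)).getD cur [] ++ (pmTokens cs).1))
               (pmTokens cs).2, k) := by
  induction cs with
  | nil =>
    intro p0 p1 p2 p3 cur hc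
    refine ⟨cur, ?_⟩
    interval_cases cur <;> simp [pmOvw, pmTokens]
  | cons c cs ih =>
    intro p0 p1 p2 p3 cur hc
    by_cases h1 : c = '!'
    · subst h1
      obtain ⟨k, hk⟩ := ih p0 [] p2 p3 1 (by norm_num)
      refine ⟨k, ?_⟩
      simp only [List.foldl_cons]
      rw [show pmStepA ([p0,p1,p2,p3], cur) '!' = ([p0,[],p2,p3], 1) by
        simp [pmStepA, pmSyms, PySem.Dict.get?_mk_cons]]
      rw [hk]
      interval_cases cur <;>
        simp [pmTokens, pmOvw, pmIsDelim, pmTable, PySem.Dict.getD, PySem.Dict.get?_mk_cons]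
    · by_cases h2 : c = '@'
      · subst h2
        obtain ⟨k, hk⟩ := ih p0 p1 [] p3 2 (by norm_num)
        refine ⟨k, ?_⟩
        simp only [List.foldl_cons]
        rw [show pmStepA ([p0,p1,p2,p3], cur) '@' = ([p0,p1,[],p3], 2) by
          simp [pmStepA, pmSyms, PySem.Dict.get?_mk_cons]]
        rw [hk]
        interval_cases cur <;>
          simp [pmTokens, pmOvw, pmIsDelim, pmTable, PySem.Dict.getD, PySem.Dict.get?_mk_cons]
      · by_cases h3 : c = '$'
        · subst h3
          obtain ⟨k, hk⟩ := ih p0 p1 p2 [] 3 (by norm_num)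
          refine ⟨k, ?_⟩
          simp only [List.foldl_cons]
          rw [show pmStepA ([p0,p1,p2,p3], cur) '$' = ([p0,p1,p2,[]], 3) by
            simp [pmStepA, pmSyms, PySem.Dict.get?_mk_cons]]
          rw [hk]
          interval_cases cur <;>
            simp [pmTokens, pmOvw, pmIsDelim, pmTable, PySem.Dict.getD, PySem.Dict.get?_mk_cons]
        · have hget : pmSyms.get? c = none := by
            have b1 : ('!' == c) = false := by simpa using (Ne.symm h1)
            have b2 : ('@' == c) = false := by simpa using (Ne.symm h2)
            have b3 : ('$' == c) = false := by simpa using (Ne.symm h3)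
            simp [pmSyms, b1, b2, b3, PySem.Dict.get?]
          have hdel : pmIsDelim c = false := by simp [pmIsDelim, h1, h2, h3]
          interval_cases cur
          · obtain ⟨k, hk⟩ := ih (p0 ++ [c]) p1 p2 p3 0 (by norm_num)
            refine ⟨k, ?_⟩
            simp only [List.foldl_cons]
            rw [show pmStepA ([p0,p1,p2,p3], 0) c = ([p0 ++ [c],p1,p2,p3], 0) by
              simp [pmStepA, hget, List.getD]]
            rw [hk]
            simp [pmTokens, hdel, pmOvw]
          · obtain ⟨k, hk⟩ := ih p0 (p1 ++ [c]) p2 p3 1 (by norm_num)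
            refine ⟨k, ?_⟩
            simp only [List.foldl_cons]
            rw [show pmStepA ([p0,p1,p2,p3], 1) c = ([p0,p1 ++ [c],p2,p3], 1) by
              simp [pmStepA, hget, List.getD]]
            rw [hk]
            simp [pmTokens, hdel, pmOvw]
          · obtain ⟨k, hk⟩ := ih p0 p1 (p2 ++ [c]) p3 2 (by norm_num)
            refine ⟨k, ?_⟩
            simp only [List.foldl_cons]
            rw [show pmStepA ([p0,p1,p2,p3], 2) c = ([p0,p1,p2 ++ [c],p3], 2) by
              simp [pmStepA, hget, List.getD]]
            rw [hk]
            simp [pmTokens, hdel, pmOvw]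
          · obtain ⟨k, hk⟩ := ih p0 p1 p2 (p3 ++ [c]) 3 (by norm_num)
            refine ⟨k, ?_⟩
            simp only [List.foldl_cons]
            rw [show pmStepA ([p0,p1,p2,p3], 3) c = ([p0,p1,p2,p3 ++ [c]], 3) by
              simp [pmStepA, hget, List.getD]]
            rw [hk]
            simp [pmTokens, hdel, pmOvw]

lemma pmAddLast_append (xs : List (List Char)) (s : List Char) (c : Char) :
    pmAddLast (xs ++ [s]) c = xs ++ [s ++ [c]] := by
  induction xs with
  | nil => rfl
  | cons x xs ih =>
    cases xs with
    | nil => rfl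
    | cons y ys => simpa [pmAddLast] using ih

-- B's tokenizing loop, from any state whose segment list is nonempty: append the first
-- token to the last open segment, then list the (delimiter, segment) pairs.
lemma pmB_run (cs : List Char) :
    ∀ (segs0 : List (List Char)) (s : List Char) (d0 : List Char),
      cs.foldl pmStepB (segs0 ++ [s], d0) =
        (segs0 ++ (s ++ (pmTokens cs).1) :: (pmTokens cs).2.map Prod.snd,
         d0 ++ (pmTokens cs).2.map Prod.fst) := by
  induction cs with
  | nil => intro segs0 s d0; simp [pmTokens]
  | cons c cs ih =>
    intro segs0 s d0
    by_cases hd : pmIsDelim c = true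
    · have h1 := ih (segs0 ++ [s]) [] (d0 ++ [c])
      simp only [List.foldl_cons, pmStepB, hd, if_pos]
      rw [show segs0 ++ [s] ++ [[]] = (segs0 ++ [s]) ++ [([] : List Char)] by simp]
      rw [h1]
      simp [pmTokens, hd]
    · have h1 := ih segs0 (s ++ [c]) d0
      simp only [List.foldl_cons, pmStepB, hd, if_neg, Bool.false_eq_true, not_false_iff]
      rw [pmAddLast_append, h1]
      simp [pmTokens, hd]

-- ===== VERDICT (by name: the statement is the Claim_ definition above) =====
theorem parse_mask_spec : Claim_equal_parse_mask := by
  intro mask _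
  unfold Spec_parse_mask
  obtain ⟨k, hA⟩ := pmA_run mask.toList [] [] [] [] 0 (by norm_num)
  have hA' : mask.toList.foldl pmStepA ([[], [], [], []], 0) =
      (pmOvw [(pmTokens mask.toList).1, [], [], []] (pmTokens mask.toList).2, k) := by
    simpa using hA
  have hB := pmB_run mask.toList [] [] []
  have hB' : mask.toList.foldl pmStepB ([[]], []) =
      ((pmTokens mask.toList).1 :: (pmTokens mask.toList).2.map Prod.snd,
       (pmTokens mask.toList).2.map Prod.fst) := by
    simpa using hB
  obtain ⟨q0, q1, q2, q3, hq⟩ :=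
    pmOvw4 (pmTokens mask.toList).2 (pmTokens mask.toList).1 [] [] []
  simp only [parse_mask, parse_mask_alt, hA', hB']
  rw [show ((pmTokens mask.toList).2.map Prod.fst).zip
        (((pmTokens mask.toList).1 :: (pmTokens mask.toList).2.map Prod.snd).drop 1) =
        (pmTokens mask.toList).2 by
    simpa using (List.zip_of_prod (xs := (pmTokens mask.toList).2) rfl rfl).symm]
  rw [show (((pmTokens mask.toList).1 :: (pmTokens mask.toList).2.map Prod.snd).getD 0 []) =
        (pmTokens mask.toList).1 from rfl]
  rw [show ((pmTokens mask.toList).2.foldl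
        (fun (p : List (List Char)) dt => p.set (pmTable.getD dt.1 0) dt.2)
        [(pmTokens mask.toList).1, [], [], []]) =
      pmOvw [(pmTokens mask.toList).1, [], [], []] (pmTokens mask.toList).2 from rfl]
  rw [hq]
  simp [List.getD]
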